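-- pv_equiv track=rewrite | github.com/leson238/Project | Problem 19 Counting Sundays.py | sum_days
-- ===== SOURCE A (Python) =====
-- def sum_days(start,end):
--     sums = 0
--     for i in range(start,end+1):
--         if (i % 4 == 0) or (i % 400 == 0):
--             sums += 366
--         elif i % 4 == 0 and i % 400 !=0:
--             sums += 365
--         else:
--             sums += 365
--     return sums
-- ===== SOURCE B (Python) =====
-- def sum_days(start, end):
--     # Closed form: every year in [start, end] contributes 365, plus 1 extra
--     # for each multiple of 4 in the range (A's 366-branch fires exactly when i % 4 == 0).
--     if start > end:
--         return 0
--     n = end - start + 1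
--     leaps = end // 4 - (start - 1) // 4
--     return 365 * n + leaps
-- ===== Notes on version B (the rewrite author's own statement) =====
-- stated objective: faster
-- what changed: Replaced the per-year loop with an O(1) closed form: 365 per year plus the count of multiples of 4 in [start,end] computed by floor division (A's 366-branch fires exactly when i % 4 == 0).
import Mathlib
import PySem

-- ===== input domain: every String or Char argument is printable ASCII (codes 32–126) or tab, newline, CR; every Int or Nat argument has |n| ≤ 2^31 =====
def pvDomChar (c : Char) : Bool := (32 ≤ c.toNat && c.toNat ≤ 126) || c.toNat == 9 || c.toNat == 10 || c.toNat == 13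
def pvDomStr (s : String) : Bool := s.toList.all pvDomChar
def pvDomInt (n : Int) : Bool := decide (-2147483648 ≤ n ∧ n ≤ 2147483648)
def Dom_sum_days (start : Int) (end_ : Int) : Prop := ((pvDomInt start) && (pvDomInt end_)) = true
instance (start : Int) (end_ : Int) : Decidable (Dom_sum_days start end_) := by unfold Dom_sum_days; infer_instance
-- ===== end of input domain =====

-- B replaces A's per-year loop by a closed form (365 per year + multiples of 4 via floor division); faster (asymptotic).


-- ===== PORT A =====
def sum_days (start : Int) (end_ : Int) : Int :=
  (PySem.List.pyRange start (end_ + 1) 1).foldl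
    (fun sums i =>
      if PySem.Int.mod i 4 = 0 ∨ PySem.Int.mod i 400 = 0 then sums + 366
      else if PySem.Int.mod i 4 = 0 ∧ PySem.Int.mod i 400 ≠ 0 then sums + 365
      else sums + 365)
    0

-- ===== PORT B =====
def sum_days_alt (start : Int) (end_ : Int) : Int :=
  if start > end_ then 0
  else
    let n := end_ - start + 1
    let leaps := PySem.Int.floordiv end_ 4 - PySem.Int.floordiv (start - 1) 4
    365 * n + leaps

-- ===== PRECONDITION & SPEC =====
def Spec_sum_days (start : Int) (end_ : Int) (out : Int) : Prop := out = sum_days_alt start end_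
instance (start : Int) (end_ : Int) (out : Int) : Decidable (Spec_sum_days start end_ out) := by unfold Spec_sum_days; infer_instance

-- ===== CLAIM (what is proved, stated in full; the proofs are below) =====
def Claim_equal_sum_days : Prop := ∀ (start : Int) (end_ : Int), Dom_sum_days start end_ → Spec_sum_days start end_ (sum_days start end_)

-- ===== LEMMAS AND PROOFS =====

theorem sum_days_step (a b : Int) (h : a ≤ b) :
    sum_days a b = sum_days a (b - 1) + (if PySem.Int.mod b 4 = 0 ∨ PySem.Int.mod b 400 = 0 then 366 else 365) := by
  unfold sum_days
  have hb : b - 1 + 1 = b := by ring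
  rw [PySem.List.pyRange_one_succ_right h, List.foldl_append, hb]
  simp only [List.foldl_cons, List.foldl_nil]
  split_ifs with h1 h2 <;> simp_all

theorem leap_count (b : Int) :
    PySem.Int.floordiv b 4 - PySem.Int.floordiv (b - 1) 4
      = (if PySem.Int.mod b 4 = 0 ∨ PySem.Int.mod b 400 = 0 then 1 else 0) := by
  rw [PySem.Int.floordiv_eq_ediv_of_pos (a := b) (by norm_num),
      PySem.Int.floordiv_eq_ediv_of_pos (a := b - 1) (by norm_num),
      PySem.Int.mod_eq_emod_of_pos (a := b) (b := 4) (by norm_num),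
      PySem.Int.mod_eq_emod_of_pos (a := b) (b := 400) (by norm_num)]
  split_ifs with h
  · rcases h with h | h <;> omega
  · push Not at h
    omega

theorem sum_days_closed (a : Int) (n : Nat) :
    sum_days a (a + n - 1) = 365 * n + (PySem.Int.floordiv (a + n - 1) 4 - PySem.Int.floordiv (a - 1) 4) := by
  induction n with
  | zero =>
    simp only [Nat.cast_zero, add_zero]
    unfold sum_days
    rw [PySem.List.pyRange_one_eq_nil (by omega)]
    simp
  | succ k ih =>
    have hle : a ≤ a + (k + 1 : Nat) - 1 := by push_cast; omega
    rw [sum_days_step a _ hle]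
    have he : a + ((k + 1 : Nat) : Int) - 1 - 1 = a + k - 1 := by push_cast; ring
    rw [he, ih]
    have hl := leap_count (a + ((k + 1 : Nat) : Int) - 1)
    rw [show a + ((k + 1 : Nat) : Int) - 1 - 1 = a + (k : Int) - 1 by push_cast; ring] at hl
    push_cast at hl ⊢
    split_ifs at hl ⊢ <;> linarith

-- ===== VERDICT (by name: the statement is the Claim_ definition above) =====
theorem sum_days_spec : Claim_equal_sum_days := by
  intro start end_ _
  unfold Spec_sum_days sum_days_alt
  split_ifs with h
  · unfold sum_days
    rw [PySem.List.pyRange_one_eq_nil (by omega)]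
    rfl
  · push Not at h
    have hn : end_ = start + ((end_ - start + 1).toNat : Int) - 1 := by omega
    rw [hn, sum_days_closed start ((end_ - start + 1).toNat)]
    have : ((end_ - start + 1).toNat : Int) = end_ - start + 1 := by omega
    rw [this]
    ring
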